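-- pv_equiv track=rewrite | github.com/JaraVictoria/SSL | Lexer/automataLlaveCerrar.py | automata_llaveCerrar
-- ===== SOURCE A (Python) =====
-- ESTADO_FINAL = "ESTADO ACEPTADO"
--
-- ESTADO_NO_FINAL = "ESTADO NO ACEPTADO"
--
-- ESTADO_TRAMPA = "ESTADO TRAMPA"
--
-- def automata_llaveCerrar(cadena):
-- 	estado = 0
-- 	estados_finales = [1]
--
-- 	for caracter in cadena:
-- 		if estado == 0 and caracter == "}":
-- 			estado = 1
-- 		else:
-- 			estado = -1
-- 			break
--
-- 	if estado == -1:
-- 		return ESTADO_TRAMPA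
-- 	if estado in estados_finales:
-- 		return ESTADO_FINAL
-- 	else:
-- 		return ESTADO_NO_FINAL
-- ===== SOURCE B (Python) =====
-- ESTADO_FINAL = "ESTADO ACEPTADO"
-- ESTADO_NO_FINAL = "ESTADO NO ACEPTADO"
-- ESTADO_TRAMPA = "ESTADO TRAMPA"
--
-- def automata_llaveCerrar(cadena):
--     if cadena == "}":
--         return ESTADO_FINAL
--     elif cadena == "":
--         return ESTADO_NO_FINAL
--     else:
--         return ESTADO_TRAMPA
-- ===== Notes on version B (the rewrite author's own statement) =====
-- stated objective: simpler
-- what changed: Replaced the character-by-character state-machine loop with a direct three-way comparison of the whole string ("}" -> accepted, "" -> not accepted, anything else -> trap).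
import Mathlib
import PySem

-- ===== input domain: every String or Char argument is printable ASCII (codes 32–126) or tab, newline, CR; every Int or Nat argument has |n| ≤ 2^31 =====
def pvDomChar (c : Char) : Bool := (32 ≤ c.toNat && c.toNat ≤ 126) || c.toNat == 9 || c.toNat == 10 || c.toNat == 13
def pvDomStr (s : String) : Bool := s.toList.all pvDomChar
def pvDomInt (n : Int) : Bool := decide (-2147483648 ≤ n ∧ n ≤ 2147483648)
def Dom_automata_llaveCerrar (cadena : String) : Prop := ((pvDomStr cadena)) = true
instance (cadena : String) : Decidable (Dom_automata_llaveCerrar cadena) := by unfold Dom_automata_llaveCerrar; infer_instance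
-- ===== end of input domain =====

-- B replaces A's per-character state-machine loop by a direct comparison of the whole string; objective: simpler.

-- ===== PORT A =====
-- the for-loop with break: returns the final 'estado'
def automataLoopA : List Char → Int → Int
  | [], estado => estado
  | c :: rest, estado =>
      if estado == 0 && c == '}' then automataLoopA rest 1
      else (-1 : Int)  -- 'break' after estado = -1

def automata_llaveCerrar (cadena : String) : String :=
  let estado : Int := automataLoopA cadena.toList 0
  let estados_finales : List Int := [1]
  if estado = -1 then "ESTADO TRAMPA"
  else if estado ∈ estados_finales then "ESTADO ACEPTADO"
  else "ESTADO NO ACEPTADO"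

-- ===== PORT B =====
def automata_llaveCerrar_alt (cadena : String) : String :=
  if cadena = "}" then "ESTADO ACEPTADO"
  else if cadena = "" then "ESTADO NO ACEPTADO"
  else "ESTADO TRAMPA"

-- ===== PRECONDITION & SPEC =====
def Spec_automata_llaveCerrar (cadena : String) (out : String) : Prop := out = automata_llaveCerrar_alt cadena
instance (cadena : String) (out : String) : Decidable (Spec_automata_llaveCerrar cadena out) := by unfold Spec_automata_llaveCerrar; infer_instance

-- ===== CLAIM (what is proved, stated in full; the proofs are below) =====
def Claim_equal_automata_llaveCerrar : Prop := ∀ (cadena : String), Dom_automata_llaveCerrar cadena → Spec_automata_llaveCerrar cadena (automata_llaveCerrar cadena)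

-- ===== LEMMAS AND PROOFS =====

theorem string_eq_iff_toList (s t : String) : s = t ↔ s.toList = t.toList := by
  constructor
  · intro h; rw [h]
  · intro h; exact String.ext (by simpa using h)

-- ===== VERDICT (by name: the statement is the Claim_ definition above) =====
theorem automata_llaveCerrar_spec : Claim_equal_automata_llaveCerrar := by
  intro cadena _
  unfold Spec_automata_llaveCerrar automata_llaveCerrar automata_llaveCerrar_alt
  simp only [string_eq_iff_toList]
  match h : cadena.toList with
  | [] => simp [automataLoopA]
  | [c] =>
      by_cases hc : c = '}'
      · subst hc; simp [automataLoopA]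
      · simp [automataLoopA, hc]
  | c :: d :: rest =>
      by_cases hc : c = '}'
      · subst hc; simp [automataLoopA]
      · simp [automataLoopA, hc]
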